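-- pv_equiv track=rewrite | github.com/iureche13/Finance-Sis | CheckIdentity.py | name_in_email
-- ===== SOURCE A (Python) =====
-- def name_in_email(first_name, last_name, local_part):
--     local_part = local_part.lower()
--     first_name = first_name.lower()
--     last_name = last_name.lower()
--     total = 0
--     first = False
--     last = False
--
--     # Check substrings of first name (length > 2)
--     for i in range(len(first_name)):
--         for j in range(i + 3, len(first_name) + 1):  # +3 ensures substring length > 2
--             if first_name[i:j] in local_part:
--                 first = True
--     if first:
--         total += 10
--
--     # Check substrings of last name (length > 2)
--     for i in range(len(last_name)):
--         for j in range(i + 3, len(last_name) + 1):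
--             if last_name[i:j] in local_part:
--                 last = True
--     if last:
--         total += 15
--
--     # more common to have last name in email than first so weighted higher
--     return (total, first, last)
-- ===== SOURCE B (Python) =====
-- def name_in_email(first_name, last_name, local_part):
--     lp = local_part.lower()
--     # every substring of length >= 3 contains a length-3 window, so the flag
--     # is equivalent to "some length-3 window of the name occurs in lp"
--     tris = {lp[k:k + 3] for k in range(len(lp) - 2)}
--
--     def hit(name):
--         name = name.lower()
--         return any(name[i:i + 3] in tris for i in range(len(name) - 2))
--
--     first = hit(first_name)
--     last = hit(last_name)
--     return (10 * first + 15 * last, first, last)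
-- ===== Notes on version B (the rewrite author's own statement) =====
-- stated objective: faster
-- what changed: A enumerates every substring of each name of length >= 3 and runs a substring search in local_part for each; B precomputes the set of length-3 windows of local_part once and checks each name with a single pass over its length-3 windows, since a substring of length >= 3 occurs in local_part iff one of its length-3 windows does.
import Mathlib
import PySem

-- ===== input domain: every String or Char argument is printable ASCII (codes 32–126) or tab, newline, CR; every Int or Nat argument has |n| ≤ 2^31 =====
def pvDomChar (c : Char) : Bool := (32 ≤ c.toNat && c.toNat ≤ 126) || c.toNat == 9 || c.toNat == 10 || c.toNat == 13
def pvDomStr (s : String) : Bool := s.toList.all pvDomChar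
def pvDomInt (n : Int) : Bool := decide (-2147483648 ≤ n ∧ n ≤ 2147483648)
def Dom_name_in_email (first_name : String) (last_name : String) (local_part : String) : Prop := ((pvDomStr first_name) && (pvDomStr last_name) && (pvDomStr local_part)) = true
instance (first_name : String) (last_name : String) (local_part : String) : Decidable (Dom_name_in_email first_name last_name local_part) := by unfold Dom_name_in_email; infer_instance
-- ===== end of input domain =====

-- B replaces A's enumeration of all length-≥3 substrings of each name (each searched in
-- local_part) by a precomputed set of the length-3 windows of local_part, checked against
-- the length-3 windows of each name — measurably faster on long inputs.


-- ===== PORT A =====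
-- the nested 'for i … for j …' loops setting the flag, for one (already lowered) name
def pvScanA (nm : String) (lp : String) : Bool :=
  (PySem.List.pyRange 0 (PySem.Str.len nm) 1).foldl (fun fl i =>
    (PySem.List.pyRange (i + 3) (PySem.Str.len nm + 1) 1).foldl (fun fl j =>
      if PySem.Str.isIn (PySem.Str.slice nm (some i) (some j)) lp then true else fl) fl) false

def name_in_email (first_name : String) (last_name : String) (local_part : String) : Int × Bool × Bool :=
  let lp := PySem.Str.lower local_part
  let fn := PySem.Str.lower first_name
  let ln := PySem.Str.lower last_name
  let total : Int := 0
  let first := pvScanA fn lp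
  let total := if first then total + 10 else total
  let last := pvScanA ln lp
  let total := if last then total + 15 else total
  (total, first, last)

-- ===== PORT B =====
-- 'hit(name)': any length-3 window of the lowered name is in the trigram set
def pvHit (tris : PySem.Set String) (name : String) : Bool :=
  let nm := PySem.Str.lower name
  (PySem.List.pyRange 0 (PySem.Str.len nm - 2) 1).any (fun i =>
    PySem.Set.contains tris (PySem.Str.slice nm (some i) (some (i + 3))))

def name_in_email_alt (first_name : String) (last_name : String) (local_part : String) : Int × Bool × Bool :=
  let lp := PySem.Str.lower local_part
  let tris := PySem.Set.ofList ((PySem.List.pyRange 0 (PySem.Str.len lp - 2) 1).map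
      (fun k => PySem.Str.slice lp (some k) (some (k + 3))))
  let first := pvHit tris first_name
  let last := pvHit tris last_name
  ((if first then (10 : Int) else 0) + (if last then (15 : Int) else 0), first, last)

-- ===== PRECONDITION & SPEC =====
def Spec_name_in_email (first_name : String) (last_name : String) (local_part : String) (out : Int × Bool × Bool) : Prop := out = name_in_email_alt first_name last_name local_part
instance (first_name : String) (last_name : String) (local_part : String) (out : Int × Bool × Bool) : Decidable (Spec_name_in_email first_name last_name local_part out) := by unfold Spec_name_in_email; infer_instance

-- ===== CLAIM (what is proved, stated in full; the proofs are below) =====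
def Claim_equal_name_in_email : Prop := ∀ (first_name : String) (last_name : String) (local_part : String), Dom_name_in_email first_name last_name local_part → Spec_name_in_email first_name last_name local_part (name_in_email first_name last_name local_part)

-- ===== LEMMAS AND PROOFS =====

-- a foldl that only ever turns the flag on is List.any
theorem pv_foldl_or (l : List Int) (g : Int → Bool) (b : Bool) :
    l.foldl (fun fl i => fl || g i) b = (b || l.any g) := by
  induction l generalizing b with
  | nil => simp
  | cons x t ih => simp [List.foldl, ih, Bool.or_assoc]

-- a length-3 infix of l is a length-3 window of l
theorem pv_infix_window {α : Type} (t l : List α) (ht : t.length = 3) (h : t <:+: l) :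
    ∃ k : Nat, k + 3 ≤ l.length ∧ t = (l.drop k).take 3 := by
  obtain ⟨pre, suf, rfl⟩ := h
  refine ⟨pre.length, by simp [ht], ?_⟩
  rw [List.append_assoc, List.drop_left' rfl, List.take_append_of_le_length (by omega),
    List.take_of_length_le (by omega)]

-- the per-name flag: A's nested substring scan equals B's trigram-set membership pass
theorem pv_chars_slice (xs : List Char) (a b : Option Int) :
    PySem.Chars.slice xs a b = PySem.List.slice xs a b := rfl

theorem pv_slice3 (xs : List Char) (m : Nat) :
    PySem.List.slice xs (some (m : Int)) (some ((m : Int) + 3)) = (xs.drop m).take 3 := by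
  rw [show ((m : Int) + 3) = ((m + 3 : Nat) : Int) by push_cast; ring, PySem.List.slice_natCast]
  norm_num

theorem pv_scan_eq (n l : String) :
    pvScanA n l = (PySem.List.pyRange 0 (PySem.Str.len n - 2) 1).any (fun i =>
      PySem.Set.contains (PySem.Set.ofList ((PySem.List.pyRange 0 (PySem.Str.len l - 2) 1).map
        (fun k => PySem.Str.slice l (some k) (some (k + 3)))))
        (PySem.Str.slice n (some i) (some (i + 3)))) := by
  unfold pvScanA
  have h1 : ∀ (fl : Bool) (i : Int),
      (PySem.List.pyRange (i + 3) (PySem.Str.len n + 1) 1).foldl (fun fl j =>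
        if PySem.Str.isIn (PySem.Str.slice n (some i) (some j)) l then true else fl) fl
      = (fl || (PySem.List.pyRange (i + 3) (PySem.Str.len n + 1) 1).any (fun j =>
          PySem.Str.isIn (PySem.Str.slice n (some i) (some j)) l)) :=
    fun fl i => PySem.List.foldl_if_true_eq _ _ fl
  simp only [h1, pv_foldl_or, Bool.false_or]
  rw [Bool.eq_iff_iff]
  simp only [List.any_eq_true, PySem.List.mem_pyRange_one, PySem.Set.contains_iff,
    PySem.Set.mem_ofList, List.mem_map, PySem.Str.len_eq]
  constructor
  · rintro ⟨i, ⟨hi0, hiN⟩, j, ⟨hij, hjN⟩, hin⟩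
    rw [PySem.Str.isIn_iff_infix, PySem.Str.toList_slice] at hin
    lift i to Nat using hi0 with iN
    lift j to Nat using (by omega) with jN
    rw [pv_chars_slice, PySem.List.slice_natCast] at hin
    have h3 : iN + 3 ≤ jN := by omega
    have hNlen : iN + 3 ≤ n.toList.length := by omega
    have htri : (n.toList.drop iN).take 3 <:+: l.toList := by
      have hpre : (n.toList.drop iN).take 3 <+: (n.toList.drop iN).take (jN - iN) := by
        have hp := List.take_prefix 3 ((n.toList.drop iN).take (jN - iN))
        rwa [List.take_take, min_eq_left (by omega)] at hp
      exact hpre.isInfix.trans hin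
    have hlen3 : ((n.toList.drop iN).take 3).length = 3 := by
      rw [List.length_take, List.length_drop]; omega
    obtain ⟨k, hk, hkeq⟩ := pv_infix_window _ _ hlen3 htri
    refine ⟨(iN : Int), ⟨by positivity, by omega⟩, (k : Int), ⟨⟨by positivity, by omega⟩, ?_⟩⟩
    rw [← String.toList_inj, PySem.Str.toList_slice, PySem.Str.toList_slice, pv_chars_slice,
      pv_chars_slice, pv_slice3, pv_slice3, ← hkeq]
  · rintro ⟨i, ⟨hi0, hiN⟩, k, ⟨⟨hk0, hkM⟩, heq⟩⟩
    lift i to Nat using hi0 with iN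
    lift k to Nat using hk0 with kN
    refine ⟨(iN : Int), ⟨by positivity, by omega⟩, (iN : Int) + 3, ⟨le_refl _, by omega⟩, ?_⟩
    rw [PySem.Str.isIn_iff_infix, PySem.Str.toList_slice, pv_chars_slice, pv_slice3]
    have := congrArg String.toList heq
    rw [PySem.Str.toList_slice, PySem.Str.toList_slice, pv_chars_slice, pv_chars_slice,
      pv_slice3, pv_slice3] at this
    rw [← this]
    exact (List.take_prefix _ _).isInfix.trans (List.drop_suffix _ _).isInfix

-- ===== VERDICT (by name: the statement is the Claim_ definition above) =====
theorem name_in_email_spec : Claim_equal_name_in_email := by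
  intro fn ln lp _
  unfold Spec_name_in_email name_in_email name_in_email_alt pvHit
  simp only [pv_scan_eq]
  cases h1 : (PySem.List.pyRange 0 (PySem.Str.len (PySem.Str.lower fn) - 2) 1).any _ <;>
  cases h2 : (PySem.List.pyRange 0 (PySem.Str.len (PySem.Str.lower ln) - 2) 1).any _ <;> rfl
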